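-- pv_equiv track=rewrite | github.com/adamsellars/PR301-Assignment3 | AraBCPR301Assignment1-master/model/python_builder.py | find_method_details
-- ===== SOURCE A (Python) =====
-- def find_method_details(total_words, plant_method):
--     for i in range(total_words):
--         if "(" in plant_method[i]:
--             for j in range(i, total_words):
--                 if ")" in plant_method[j]:
--                     plant_method = list(plant_method)
--                     plant_method[j + 1] = " ->"
--                     my_method = "".join(plant_method).lstrip()
--     return my_method
-- ===== SOURCE B (Python) =====
-- def find_method_details(total_words, plant_method):
--     # Single left-to-right pass: once an opening parenthesis has been seen,
--     # every token containing ')' gets ' ->' written into the next slot;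
--     # the token list is joined once at the end instead of after every write.
--     # (A's later outer passes re-do work that changes nothing.)
--     tokens = list(plant_method)
--     open_seen = False
--     wrote = False
--     for k in range(total_words):
--         word = tokens[k]
--         if "(" in word:
--             open_seen = True
--         if open_seen and ")" in word:
--             tokens[k + 1] = " ->"
--             wrote = True
--     if wrote:
--         my_method = "".join(tokens).lstrip()
--     return my_method
-- ===== Notes on version B (the rewrite author's own statement) =====
-- stated objective: faster
-- what changed: Replaces A's nested double loop (one full inner pass per '('-token) by a single left-to-right pass with an open_seen flag, joining the token list once at the end.
import Mathlib
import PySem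

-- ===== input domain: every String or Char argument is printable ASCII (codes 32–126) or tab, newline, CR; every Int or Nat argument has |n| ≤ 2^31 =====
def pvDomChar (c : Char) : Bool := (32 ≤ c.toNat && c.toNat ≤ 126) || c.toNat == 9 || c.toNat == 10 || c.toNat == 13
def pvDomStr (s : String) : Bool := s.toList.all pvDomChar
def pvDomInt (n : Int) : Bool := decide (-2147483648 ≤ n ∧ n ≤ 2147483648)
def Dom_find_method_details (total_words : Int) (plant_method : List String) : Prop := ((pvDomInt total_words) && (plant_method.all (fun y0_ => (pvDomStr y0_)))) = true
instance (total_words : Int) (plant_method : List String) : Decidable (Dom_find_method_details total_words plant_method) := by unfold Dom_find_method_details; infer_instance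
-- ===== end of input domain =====

-- B replaces A's nested double loop by a single left-to-right pass with an open-paren flag,
-- joining the token list once at the end; where my_method stays unbound, both raise (outside Pre_).

-- ===== PORT A =====
-- inner loop body: 'if ")" in plant_method[j]: plant_method[j+1] = " ->"; my_method = join(...).lstrip()'
-- (pyGetD/pySetD are the total forms of the Python indexings; exact under Pre_, which excludes the IndexErrors)
def fmdInnerStep (st : List String × Option String) (j : Int) : List String × Option String :=
  if PySem.Str.isIn ")" (PySem.List.pyGetD st.1 j "") then
    let pm := PySem.List.pySetD st.1 (j + 1) " ->"
    (pm, some (PySem.Str.lstrip (PySem.Str.join "" pm)))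
  else st

-- outer loop body: 'if "(" in plant_method[i]: for j in range(i, total_words): ...'
def fmdOuterStep (total_words : Int) (st : List String × Option String) (i : Int) :
    List String × Option String :=
  if PySem.Str.isIn "(" (PySem.List.pyGetD st.1 i "") then
    (PySem.List.pyRange i total_words 1).foldl fmdInnerStep st
  else st

-- my_method is threaded as Option String (none = still unbound; unbound return is excluded by Pre_)
def find_method_details (total_words : Int) (plant_method : List String) : String :=
  (((PySem.List.pyRange 0 total_words 1).foldl (fmdOuterStep total_words)
      (plant_method, none)).2).getD ""

-- ===== PORT B =====
-- one pass; state = (tokens, open_seen, wrote)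
def fmdAltStep (st : List String × Bool × Bool) (k : Int) : List String × Bool × Bool :=
  let word := PySem.List.pyGetD st.1 k ""
  let opens := st.2.1 || PySem.Str.isIn "(" word
  if opens && PySem.Str.isIn ")" word then
    (PySem.List.pySetD st.1 (k + 1) " ->", opens, true)
  else (st.1, opens, st.2.2)

-- 'if wrote: my_method = "".join(tokens).lstrip(); return my_method'; the not-wrote return
-- (UnboundLocalError in Python, exactly as in A) is outside Pre_ and rendered as ""
def fmdAltFinish (r : List String × Bool × Bool) : String :=
  if r.2.2 then PySem.Str.lstrip (PySem.Str.join "" r.1) else ""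

def find_method_details_alt (total_words : Int) (plant_method : List String) : String :=
  fmdAltFinish ((PySem.List.pyRange 0 total_words 1).foldl fmdAltStep (plant_method, false, false))

-- ===== PRECONDITION & SPEC =====
-- Pre_ = exactly the inputs on which the Python A returns: 0 ≤ total_words ≤ len (else IndexError
-- on read), some '('-token is followed (≥ its index, < total_words) by a ')'-token (else my_method
-- stays unbound: UnboundLocalError), and no write lands one past the end (else IndexError): the
-- last slot is written iff total_words = len and the alternating-overwrite recurrence fires at
-- len-1, characterised in closed form by the run of ')'-tokens ending there having even offset
-- from its start (clamped at i0, the first '('-index).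
def Pre_find_method_details (total_words : Int) (plant_method : List String) : Prop :=
  0 ≤ total_words ∧ total_words ≤ (plant_method.length : Int) ∧
  (∃ i : Nat, i < total_words.toNat ∧
      PySem.Str.isIn "(" (plant_method.getD i "") = true ∧
      ∃ j : Nat, j < total_words.toNat ∧ i ≤ j ∧
        PySem.Str.isIn ")" (plant_method.getD j "") = true) ∧
  ¬ (total_words = (plant_method.length : Int) ∧ 0 < plant_method.length ∧
      ∃ i0 : Nat, i0 < total_words.toNat ∧
        PySem.Str.isIn "(" (plant_method.getD i0 "") = true ∧
        (∀ i' : Nat, i' < i0 → PySem.Str.isIn "(" (plant_method.getD i' "") = false) ∧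
        ∃ s : Nat, s < plant_method.length ∧ i0 ≤ s ∧
          (plant_method.length - 1 - s) % 2 = 0 ∧
          (∀ u : Nat, u < plant_method.length → s ≤ u →
              PySem.Str.isIn ")" (plant_method.getD u "") = true) ∧
          (s = i0 ∨ PySem.Str.isIn ")" (plant_method.getD (s - 1) "") = false))
instance (total_words : Int) (plant_method : List String) : Decidable (Pre_find_method_details total_words plant_method) := by unfold Pre_find_method_details; infer_instance

def pvWitness_find_method_details : Int × List String := (3, ["f(", "x)", "end"])

-- (Where no '('-token is followed, at or after it and within range, by a ')'-token, A never
-- assigns my_method and raises UnboundLocalError — outside Pre_; B returns the lstripped join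
-- of the then-unmodified tokens there.)

def Spec_find_method_details (total_words : Int) (plant_method : List String) (out : String) : Prop := out = find_method_details_alt total_words plant_method
instance (total_words : Int) (plant_method : List String) (out : String) : Decidable (Spec_find_method_details total_words plant_method out) := by unfold Spec_find_method_details; infer_instance

-- ===== CLAIM (what is proved, stated in full; the proofs are below) =====
def Claim_equal_find_method_details : Prop := ∀ (total_words : Int) (plant_method : List String), Dom_find_method_details total_words plant_method → Pre_find_method_details total_words plant_method → Spec_find_method_details total_words plant_method (find_method_details total_words plant_method)

-- ===== LEMMAS AND PROOFS =====

-- Nat-indexed reference pass both ports reduce to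
def fmdTrig (M : List String) (k : Nat) : Bool := PySem.Str.isIn ")" (M.getD k "")
def fmdHasLP (M : List String) (k : Nat) : Bool := PySem.Str.isIn "(" (M.getD k "")
def fmdPStep (M : List String) (k : Nat) : List String :=
  if fmdTrig M k then M.set (k + 1) " ->" else M
def fmdPass (M : List String) (ks : List Nat) : List String := ks.foldl fmdPStep M
def fmdIvl (a b : Nat) : List Nat := (List.range (b - a)).map (fun k => a + k)
-- 'slot k+1 is already saturated': a re-write at k would change nothing
def fmdSat (M : List String) (k : Nat) : Prop :=
  fmdTrig M k = true → M.set (k + 1) " ->" = M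

-- cast bridges
lemma fmd_pyRange_cast (a b : Nat) :
    PySem.List.pyRange (a : Int) (b : Int) 1 = (fmdIvl a b).map (fun n : Nat => (n : Int)) := by
  rw [PySem.List.pyRange_one]
  have h : ((b : Int) - (a : Int)).toNat = b - a := by omega
  rw [fmdIvl, h, List.map_map]
  exact List.map_congr_left (fun k _ => by simp only [Function.comp_apply]; push_cast; ring)

lemma fmd_pySetD_cast (M : List String) (k : Nat) (v : String) :
    PySem.List.pySetD M ((k : Int) + 1) v = M.set (k + 1) v := by
  have h : ((k : Int) + 1) = ((k + 1 : Nat) : Int) := by push_cast; ring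
  rw [h, PySem.List.pySetD_natCast]

lemma fmd_mem_ivl {a b k : Nat} : k ∈ fmdIvl a b ↔ a ≤ k ∧ k < b := by
  simp only [fmdIvl, List.mem_map, List.mem_range]
  constructor
  · rintro ⟨m, hm, rfl⟩; omega
  · rintro ⟨h1, h2⟩; exact ⟨k - a, by omega, by omega⟩

lemma fmd_ivl_append {a m b : Nat} (h1 : a ≤ m) (h2 : m ≤ b) :
    fmdIvl a b = fmdIvl a m ++ fmdIvl m b := by
  have := PySem.List.pyRange_one_append (a : Int) (m : Int) (b : Int)
    (by exact_mod_cast h1) (by exact_mod_cast h2)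
  rw [fmd_pyRange_cast, fmd_pyRange_cast, fmd_pyRange_cast, ← List.map_append] at this
  exact List.map_injective_iff.mpr (fun x y => by exact_mod_cast id) this

lemma fmd_ivl_cons {a b : Nat} (h : a < b) : fmdIvl a b = a :: fmdIvl (a + 1) b := by
  have h0 : fmdIvl a (a + 1) = [a] := by simp [fmdIvl]
  rw [fmd_ivl_append (Nat.le_succ a) h, h0]; rfl

-- getD after set
lemma fmd_getD_set_ne (M : List String) {n m : Nat} (h : m ≠ n) (a d : String) :
    (M.set n a).getD m d = M.getD m d := by
  rw [List.getD, List.getD, List.getElem?_set_ne (by omega)]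

-- saturation facts
lemma fmd_sat_persist {M : List String} {k p : Nat} (h : fmdSat M k) :
    fmdSat (M.set p " ->") k := by
  intro ht
  by_cases hp : p < M.length
  · by_cases hkp : k = p
    · subst hkp
      rw [fmdTrig, List.getD, List.getElem?_set_self hp] at ht
      simp at ht
      exact absurd ht (by decide)
    · rw [fmdTrig, fmd_getD_set_ne M hkp] at ht
      have hMk := h ht
      by_cases hk1 : k + 1 = p
      · subst hk1; rw [List.set_set]
      · rw [List.set_comm " ->" " ->" (by omega : p ≠ k + 1), hMk]
  · have hset : M.set p " ->" = M := List.set_eq_of_length_le (by omega)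
    rw [hset] at ht ⊢
    exact h ht

lemma fmd_sat_pstep_self (M : List String) (k : Nat) : fmdSat (fmdPStep M k) k := by
  rw [fmdPStep]
  by_cases ht : fmdTrig M k = true
  · rw [if_pos ht]
    intro _
    exact List.set_set " ->"
  · rw [if_neg ht]
    intro h; exact absurd h ht

lemma fmd_sat_pstep {M : List String} {k : Nat} (j : Nat) (h : fmdSat M k) :
    fmdSat (fmdPStep M j) k := by
  rw [fmdPStep]
  by_cases ht : fmdTrig M j = true
  · rw [if_pos ht]; exact fmd_sat_persist h
  · rw [if_neg ht]; exact h

lemma fmd_pass_sat : ∀ (ks : List Nat) (M : List String) (k : Nat),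
    (k ∈ ks ∨ fmdSat M k) → fmdSat (fmdPass M ks) k := by
  intro ks
  induction ks with
  | nil => intro M k h; simpa [fmdPass] using h.resolve_left (by simp)
  | cons j ks ih =>
    intro M k h
    rw [fmdPass, List.foldl_cons, ← fmdPass]
    rcases h with h | h
    · rcases List.mem_cons.mp h with rfl | hmem
      · exact ih _ _ (Or.inr (fmd_sat_pstep_self M k))
      · exact ih _ _ (Or.inl hmem)
    · exact ih _ _ (Or.inr (fmd_sat_pstep j h))

lemma fmd_pass_id : ∀ (ks : List Nat) (M : List String),
    (∀ k ∈ ks, fmdSat M k) → fmdPass M ks = M := by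
  intro ks
  induction ks with
  | nil => intro M _; rfl
  | cons j ks ih =>
    intro M h
    have hstep : fmdPStep M j = M := by
      rw [fmdPStep]
      by_cases ht : fmdTrig M j = true
      · rw [if_pos ht]; exact h j (by simp) ht
      · rw [if_neg ht]
    rw [fmdPass, List.foldl_cons, ← fmdPass, hstep]
    exact ih M (fun k hk => h k (by simp [hk]))

-- A's inner loop over a cast Nat range, related to the reference pass
lemma fmd_innerA : ∀ (ks : List Nat) (M : List String) (m : Option String),
    ((ks.map (fun n : Nat => (n : Int))).foldl fmdInnerStep (M, m)).1 = fmdPass M ks ∧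
    (((ks.map (fun n : Nat => (n : Int))).foldl fmdInnerStep (M, m)).2 =
        some (PySem.Str.lstrip (PySem.Str.join "" (fmdPass M ks))) ∨
      (((ks.map (fun n : Nat => (n : Int))).foldl fmdInnerStep (M, m)).2 = m ∧
        fmdPass M ks = M ∧ ∀ k ∈ ks, fmdTrig M k = false)) := by
  intro ks
  induction ks with
  | nil => intro M m; exact ⟨rfl, Or.inr ⟨rfl, rfl, by simp⟩⟩
  | cons j ks ih =>
    intro M m
    have hstep : fmdInnerStep (M, m) (j : Int) =
        (fmdPStep M j,
          if fmdTrig M j then some (PySem.Str.lstrip (PySem.Str.join "" (fmdPStep M j))) else m) := by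
      rw [fmdInnerStep, fmdPStep, fmdTrig]
      simp only [PySem.List.pyGetD_natCast]
      by_cases ht : PySem.Str.isIn ")" (M.getD j "") = true
      · rw [if_pos ht, if_pos ht, if_pos ht, fmd_pySetD_cast]
      · rw [if_neg ht, if_neg ht, if_neg ht]
    rw [List.map_cons, List.foldl_cons, hstep, fmdPass, List.foldl_cons, ← fmdPass]
    by_cases ht : fmdTrig M j = true
    · rw [if_pos ht]
      obtain ⟨h1, h2⟩ := ih (fmdPStep M j) (some (PySem.Str.lstrip (PySem.Str.join "" (fmdPStep M j))))
      refine ⟨h1, Or.inl ?_⟩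
      rcases h2 with h2 | ⟨h2, h3, _⟩
      · exact h2
      · rw [h2, h3]
    · rw [if_neg ht]
      have hid : fmdPStep M j = M := by rw [fmdPStep, if_neg ht]
      rw [hid]
      obtain ⟨h1, h2⟩ := ih M m
      refine ⟨h1, ?_⟩
      rcases h2 with h2 | ⟨h2, h3, h4⟩
      · exact Or.inl h2
      · exact Or.inr ⟨h2, h3, fun k hk => by
          rcases List.mem_cons.mp hk with rfl | hmem
          · simpa using ht
          · exact h4 k hmem⟩

-- B's loop once open_seen is true
lemma fmd_altB_open : ∀ (ks : List Nat) (M : List String) (w : Bool),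
    ((ks.map (fun n : Nat => (n : Int))).foldl fmdAltStep (M, true, w)).1 = fmdPass M ks ∧
    ((ks.map (fun n : Nat => (n : Int))).foldl fmdAltStep (M, true, w)).2.1 = true ∧
    (((ks.map (fun n : Nat => (n : Int))).foldl fmdAltStep (M, true, w)).2.2 = true ∨
      (((ks.map (fun n : Nat => (n : Int))).foldl fmdAltStep (M, true, w)).2.2 = w ∧
        fmdPass M ks = M ∧ ∀ k ∈ ks, fmdTrig M k = false)) := by
  intro ks
  induction ks with
  | nil => intro M w; exact ⟨rfl, rfl, Or.inr ⟨rfl, rfl, by simp⟩⟩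
  | cons j ks ih =>
    intro M w
    have hstep : fmdAltStep (M, true, w) (j : Int) =
        (fmdPStep M j, true, if fmdTrig M j then true else w) := by
      rw [fmdAltStep, fmdPStep, fmdTrig]
      simp only [PySem.List.pyGetD_natCast, Bool.true_or, Bool.true_and]
      by_cases ht : PySem.Str.isIn ")" (M.getD j "") = true
      · rw [if_pos ht, if_pos ht, if_pos ht, fmd_pySetD_cast]
      · rw [if_neg ht, if_neg ht, if_neg ht]
    rw [List.map_cons, List.foldl_cons, hstep, fmdPass, List.foldl_cons, ← fmdPass]
    by_cases ht : fmdTrig M j = true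
    · rw [if_pos ht]
      obtain ⟨h1, h2, h3⟩ := ih (fmdPStep M j) true
      refine ⟨h1, h2, Or.inl ?_⟩
      rcases h3 with h3 | ⟨h3, _, _⟩ <;> exact h3
    · rw [if_neg ht]
      have hid : fmdPStep M j = M := by rw [fmdPStep, if_neg ht]
      rw [hid]
      obtain ⟨h1, h2, h3⟩ := ih M w
      refine ⟨h1, h2, ?_⟩
      rcases h3 with h3 | ⟨h3, h4, h5⟩
      · exact Or.inl h3
      · exact Or.inr ⟨h3, h4, fun k hk => by
          rcases List.mem_cons.mp hk with rfl | hmem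
          · simpa using ht
          · exact h5 k hmem⟩

-- B's loop before the first '(' token
lemma fmd_altB_closed : ∀ (ks : List Nat) (M : List String),
    (∀ k ∈ ks, fmdHasLP M k = false) →
    (ks.map (fun n : Nat => (n : Int))).foldl fmdAltStep (M, false, false) = (M, false, false) := by
  intro ks
  induction ks with
  | nil => intro M _; rfl
  | cons j ks ih =>
    intro M h
    have hstep : fmdAltStep (M, false, false) (j : Int) = (M, false, false) := by
      rw [fmdAltStep]
      simp only [PySem.List.pyGetD_natCast, Bool.false_or]
      rw [← fmdHasLP, h j (by simp), Bool.false_and, if_neg (by simp)]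
    rw [List.map_cons, List.foldl_cons, hstep]
    exact ih M (fun k hk => h k (by simp [hk]))

-- A's outer loop before the first '(' token
lemma fmd_outerA_closed (t : Int) : ∀ (ks : List Nat) (M : List String) (m : Option String),
    (∀ k ∈ ks, fmdHasLP M k = false) →
    (ks.map (fun n : Nat => (n : Int))).foldl (fmdOuterStep t) (M, m) = (M, m) := by
  intro ks
  induction ks with
  | nil => intro M m _; rfl
  | cons j ks ih =>
    intro M m h
    have hstep : fmdOuterStep t (M, m) (j : Int) = (M, m) := by
      rw [fmdOuterStep]
      simp only [PySem.List.pyGetD_natCast]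
      rw [← fmdHasLP, h j (by simp), if_neg (by simp)]
    rw [List.map_cons, List.foldl_cons, hstep]
    exact ih M m (fun k hk => h k (by simp [hk]))

-- A's outer loop after the first pass: the state is a fixed point
lemma fmd_outerA_stable (tn i0 : Nat) (M1 : List String)
    (hsat : ∀ k : Nat, i0 ≤ k → k < tn → fmdSat M1 k) :
    ∀ (ks : List Nat), (∀ i ∈ ks, i0 ≤ i) →
    (ks.map (fun n : Nat => (n : Int))).foldl (fmdOuterStep (tn : Int))
        (M1, some (PySem.Str.lstrip (PySem.Str.join "" M1))) =
      (M1, some (PySem.Str.lstrip (PySem.Str.join "" M1))) := by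
  intro ks
  induction ks with
  | nil => intro _; rfl
  | cons i ks ih =>
    intro h
    have hpass : fmdPass M1 (fmdIvl i tn) = M1 := by
      refine fmd_pass_id _ _ (fun k hk => ?_)
      obtain ⟨h1, h2⟩ := fmd_mem_ivl.mp hk
      exact hsat k (le_trans (h i (by simp)) h1) h2
    have hstep : fmdOuterStep (tn : Int)
        (M1, some (PySem.Str.lstrip (PySem.Str.join "" M1))) (i : Int) =
        (M1, some (PySem.Str.lstrip (PySem.Str.join "" M1))) := by
      rw [fmdOuterStep]
      by_cases hlp : PySem.Str.isIn "(" (PySem.List.pyGetD M1 (i : Int) "") = true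
      · rw [if_pos hlp, fmd_pyRange_cast i tn]
        obtain ⟨h1, h2⟩ := fmd_innerA (fmdIvl i tn) M1
          (some (PySem.Str.lstrip (PySem.Str.join "" M1)))
        rw [hpass] at h1 h2
        rcases h2 with h2 | ⟨h2, _, _⟩ <;> exact Prod.ext h1 h2
      · rw [if_neg hlp]
    rw [List.map_cons, List.foldl_cons, hstep]
    exact ih (fun k hk => h k (by simp [hk]))

-- ===== VERDICT (by name: the statement is the Claim_ definition above) =====
theorem find_method_details_spec : Claim_equal_find_method_details := by
  intro t L _ hpre
  obtain ⟨ht0, htlen, ⟨i, hi, hli, j, hj, hij, hrj⟩, _⟩ := hpre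
  set tn : Nat := t.toNat with htn
  have hteq : t = (tn : Int) := by omega
  -- i0 = the first index < tn whose token contains '('
  have hex : ∃ i' : Nat, i' < tn ∧ fmdHasLP L i' = true := ⟨i, hi, hli⟩
  classical
  set i0 : Nat := Nat.find hex with hi0def
  obtain ⟨hi0lt, hi0lp⟩ := Nat.find_spec hex
  have hmin : ∀ k : Nat, k < i0 → fmdHasLP L k = false := by
    intro k hk
    have := Nat.find_min hex hk
    simp only [not_and] at this
    by_cases hklt : k < tn
    · simpa using this hklt
    · omega
  have hi0i : i0 ≤ i := Nat.find_le ⟨hi, hli⟩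
  -- the (unique, idempotently re-run) real pass and its result
  set M1 : List String := fmdPass L (fmdIvl i0 tn) with hM1
  have hsat : ∀ k : Nat, i0 ≤ k → k < tn → fmdSat M1 k := by
    intro k h1 h2
    exact fmd_pass_sat _ _ _ (Or.inl (fmd_mem_ivl.mpr ⟨h1, h2⟩))
  -- split of the index range at i0
  have hsplit : fmdIvl 0 tn = fmdIvl 0 i0 ++ i0 :: fmdIvl (i0 + 1) tn := by
    rw [fmd_ivl_append (Nat.zero_le i0) (Nat.le_of_lt hi0lt), fmd_ivl_cons hi0lt]
  have hmem0 : ∀ k ∈ fmdIvl 0 i0, fmdHasLP L k = false := by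
    intro k hk; exact hmin k (fmd_mem_ivl.mp hk).2
  -- ===== the A side =====
  have hA : find_method_details t L = PySem.Str.lstrip (PySem.Str.join "" M1) := by
    rw [find_method_details, hteq]
    have h0 : (0 : Int) = ((0 : Nat) : Int) := rfl
    rw [h0, fmd_pyRange_cast 0 tn, hsplit, List.map_append, List.foldl_append]
    rw [fmd_outerA_closed _ _ _ _ hmem0]
    -- the step at i0: the real pass
    have hstep : fmdOuterStep (tn : Int) (L, none) ((i0 : Nat) : Int) =
        (M1, some (PySem.Str.lstrip (PySem.Str.join "" M1))) := by
      rw [fmdOuterStep]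
      have hlp : PySem.Str.isIn "(" (PySem.List.pyGetD L ((i0 : Nat) : Int) "") = true := by
        simpa [fmdHasLP] using hi0lp
      rw [if_pos hlp, fmd_pyRange_cast i0 tn]
      obtain ⟨h1, h2⟩ := fmd_innerA (fmdIvl i0 tn) L none
      rcases h2 with h2 | ⟨_, _, h4⟩
      · exact Prod.ext (by rw [h1, hM1]) (by rw [h2, hM1])
      · exact absurd (h4 j (fmd_mem_ivl.mpr ⟨le_trans hi0i hij, hj⟩)) (by rw [fmdTrig, hrj]; simp)
    rw [List.map_cons, List.foldl_cons, hstep]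
    rw [fmd_outerA_stable tn i0 M1 hsat _ (fun k hk => by
      have := (fmd_mem_ivl.mp hk).1; omega)]
    rfl
  -- ===== the B side =====
  have hB : find_method_details_alt t L = PySem.Str.lstrip (PySem.Str.join "" M1) := by
    rw [find_method_details_alt, hteq]
    have h0 : (0 : Int) = ((0 : Nat) : Int) := rfl
    rw [h0, fmd_pyRange_cast 0 tn, hsplit, List.map_append, List.foldl_append]
    rw [fmd_altB_closed _ _ hmem0]
    have hstep : fmdAltStep (L, false, false) ((i0 : Nat) : Int) =
        (fmdPStep L i0, true, fmdTrig L i0) := by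
      rw [fmdAltStep, fmdPStep, fmdTrig]
      simp only [PySem.List.pyGetD_natCast, Bool.false_or]
      have hlp : PySem.Str.isIn "(" (L.getD i0 "") = true := by simpa [fmdHasLP] using hi0lp
      rw [hlp, Bool.true_and]
      by_cases ht : PySem.Str.isIn ")" (L.getD i0 "") = true
      · rw [if_pos ht, if_pos ht, ht, fmd_pySetD_cast]
      · rw [if_neg ht, if_neg ht, eq_false_of_ne_true ht]
    rw [List.map_cons, List.foldl_cons, hstep]
    obtain ⟨h1, _, h3⟩ := fmd_altB_open (fmdIvl (i0 + 1) tn) (fmdPStep L i0) (fmdTrig L i0)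
    have hpassM1 : fmdPass (fmdPStep L i0) (fmdIvl (i0 + 1) tn) = M1 := by
      rw [hM1, fmd_ivl_cons hi0lt]
      rfl
    -- the 'wrote' flag ends up true: the ')'-token at j guarantees a write
    have hw : ((((fmdIvl (i0 + 1) tn).map (fun n : Nat => (n : Int))).foldl fmdAltStep
        (fmdPStep L i0, true, fmdTrig L i0)).2.2) = true := by
      rcases h3 with h3 | ⟨h3, h4, h5⟩
      · exact h3
      · by_cases hti0 : fmdTrig L i0 = true
        · rw [h3, hti0]
        · have hji0 : j ≠ i0 := fun hji0 => hti0 (by rw [← hji0, fmdTrig, hrj])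
          have hid : fmdPStep L i0 = L := by rw [fmdPStep, if_neg hti0]
          have := h5 j (fmd_mem_ivl.mpr ⟨by omega, hj⟩)
          rw [hid, fmdTrig, hrj] at this
          exact absurd this (by simp)
    rw [fmdAltFinish, hw, if_pos rfl, h1, hpassM1]
  rw [Spec_find_method_details, hA, hB]
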